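-- pv_equiv track=rewrite | github.com/eenzeenee/codingtest_prep | programmers/5_완전탐색_모의고사.py | solution
-- ===== SOURCE A (Python) =====
-- def solution(answers):
--     answer = []
--     answer_1 = [1,2,3,4,5]
--     answer_2 = [2,1,2,3,2,4,2,5]
--     answer_3 = [3,3,1,1,2,2,4,4,5,5]
--     num1 = 0
--     num2 = 0
--     num3 = 0
--     for i in range(len(answers)):
--         idx_1 = i % len(answer_1)
--         idx_2 = i % len(answer_2)
--         idx_3 = i % len(answer_3)
--         if answers[i] == answer_1[idx_1]:
--             num1 += 1
--         if answers[i] == answer_2[idx_2]: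
--             num2 += 1
--         if answers[i] == answer_3[idx_3]:
--             num3 += 1
--     max_num = max(num1, num2, num3)
--     if max_num == num1:
--         answer.append(1)
--     if max_num == num2:
--         answer.append(2)
--     if max_num == num3:
--         answer.append(3)
--     return answer
-- ===== SOURCE B (Python) =====
-- def solution(answers):
--     patterns = [[1, 2, 3, 4, 5],
--                 [2, 1, 2, 3, 2, 4, 2, 5],
--                 [3, 3, 1, 1, 2, 2, 4, 4, 5, 5]]
--     # One pass: histogram of (position mod 40, answer) pairs (40 = lcm of the
--     # three pattern lengths, so a position's expected answers depend only on
--     # its residue mod 40). Scores are then derived from 3*40 table lookups.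
--     hist = {}
--     for i, a in enumerate(answers):
--         key = (i % 40, a)
--         hist[key] = hist.get(key, 0) + 1
--     scores = [sum(hist.get((r, pat[r % len(pat)]), 0) for r in range(40))
--               for pat in patterns]
--     best = max(scores)
--     return [k + 1 for k in range(3) if scores[k] == best]
-- ===== Notes on version B (the rewrite author's own statement) =====
-- stated objective: alternative
-- what changed: Instead of comparing each answer against all three cyclic patterns in one loop with three counters, B makes a single pass building a histogram keyed by (index mod 40, answer) (40 = lcm of the pattern lengths) and then derives each pattern's score from 40 histogram lookups, selecting winners by an index comprehension over the score list.
import Mathlib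
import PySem

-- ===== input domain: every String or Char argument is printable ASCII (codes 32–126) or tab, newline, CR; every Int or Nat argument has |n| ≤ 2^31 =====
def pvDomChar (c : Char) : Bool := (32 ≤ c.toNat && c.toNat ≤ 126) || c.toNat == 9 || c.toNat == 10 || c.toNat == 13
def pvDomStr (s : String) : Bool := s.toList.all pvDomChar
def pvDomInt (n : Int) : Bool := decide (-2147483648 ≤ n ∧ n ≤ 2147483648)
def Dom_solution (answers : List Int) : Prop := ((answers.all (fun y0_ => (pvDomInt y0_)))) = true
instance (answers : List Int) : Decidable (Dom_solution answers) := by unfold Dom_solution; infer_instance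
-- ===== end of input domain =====

-- B replaces A's three per-element pattern comparisons by one pass that builds a
-- histogram keyed by (index mod 40, answer) — 40 = lcm of the pattern lengths —
-- and derives each score from 40 table lookups (objective: alternative).

-- ===== PORT A =====
def solution (answers : List Int) : List Int :=
  let answer_1 : List Int := [1,2,3,4,5]
  let answer_2 : List Int := [2,1,2,3,2,4,2,5]
  let answer_3 : List Int := [3,3,1,1,2,2,4,4,5,5]
  let st :=
    (PySem.List.pyRange 0 answers.length 1).foldl
      (fun (nums : Int × Int × Int) i =>
        let idx_1 := PySem.Int.mod i (answer_1.length : Int)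
        let idx_2 := PySem.Int.mod i (answer_2.length : Int)
        let idx_3 := PySem.Int.mod i (answer_3.length : Int)
        ((if PySem.List.pyGetD answers i 0 = PySem.List.pyGetD answer_1 idx_1 0 then nums.1 + 1 else nums.1),
         (if PySem.List.pyGetD answers i 0 = PySem.List.pyGetD answer_2 idx_2 0 then nums.2.1 + 1 else nums.2.1),
         (if PySem.List.pyGetD answers i 0 = PySem.List.pyGetD answer_3 idx_3 0 then nums.2.2 + 1 else nums.2.2)))
      ((0 : Int), (0 : Int), (0 : Int))
  let max_num := max st.1 (max st.2.1 st.2.2)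
  let answer : List Int := []
  let answer := if max_num = st.1 then answer ++ [1] else answer
  let answer := if max_num = st.2.1 then answer ++ [2] else answer
  let answer := if max_num = st.2.2 then answer ++ [3] else answer
  answer

-- ===== PORT B =====
def solution_alt (answers : List Int) : List Int :=
  let patterns : List (List Int) := [[1,2,3,4,5],[2,1,2,3,2,4,2,5],[3,3,1,1,2,2,4,4,5,5]]
  let hist :=
    (PySem.List.enumerate answers 0).foldl
      (fun (h : PySem.Dict (Int × Int) Int) p =>
        let key := (PySem.Int.mod p.1 40, p.2)
        h.insert key (h.getD key 0 + 1))
      PySem.Dict.empty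
  let scores := patterns.map (fun pat =>
    ((PySem.List.pyRange 0 40 1).map
       (fun r => hist.getD (r, PySem.List.pyGetD pat (PySem.Int.mod r (pat.length : Int)) 0) 0)).sum)
  -- max(scores): scores always has 3 elements, so max? never returns none; getD 0 is unreachable
  let best := (PySem.List.max? scores (fun s => s)).getD 0
  ((PySem.List.pyRange 0 3 1).filter
     (fun k => PySem.List.pyGetD scores k 0 = best)).map (fun k => k + 1)

-- ===== PRECONDITION & SPEC =====
def Spec_solution (answers : List Int) (out : List Int) : Prop := out = solution_alt answers
instance (answers : List Int) (out : List Int) : Decidable (Spec_solution answers out) := by unfold Spec_solution; infer_instance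

-- ===== CLAIM (what is proved, stated in full; the proofs are below) =====
def Claim_equal_solution : Prop := ∀ (answers : List Int), Dom_solution answers → Spec_solution answers (solution answers)

-- ===== LEMMAS AND PROOFS =====

-- splitting A's triple-counter fold into three independent counting folds
theorem foldl_triple (l : List Int) (P Q R : Int → Prop)
    [DecidablePred P] [DecidablePred Q] [DecidablePred R] (a b c : Int) :
    l.foldl (fun (nums : Int × Int × Int) i =>
        ((if P i then nums.1 + 1 else nums.1),
         (if Q i then nums.2.1 + 1 else nums.2.1),
         (if R i then nums.2.2 + 1 else nums.2.2))) (a, b, c)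
      = (l.foldl (fun n i => if P i then n + 1 else n) a,
         l.foldl (fun n i => if Q i then n + 1 else n) b,
         l.foldl (fun n i => if R i then n + 1 else n) c) := by
  induction l generalizing a b c with
  | nil => rfl
  | cons x t ih =>
    simp only [List.foldl_cons]
    exact ih _ _ _

-- B's histogram loop over pairs is the key-mapped insert-count loop
theorem foldl_insert_key {α κ : Type} [BEq κ] (l : List α) (k : α → κ)
    (d : PySem.Dict κ Int) :
    l.foldl (fun h p => h.insert (k p) (h.getD (k p) 0 + 1)) d
      = (l.map k).foldl (fun h x => h.insert x (h.getD x 0 + 1)) d := by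
  induction l generalizing d with
  | nil => rfl
  | cons x t ih => simp only [List.foldl_cons, List.map_cons]; exact ih _

-- disjoint-union step for countP over membership in a Nodup list
theorem countP_mem_cons {α : Type} [BEq α] [LawfulBEq α] (ks : List α) (t : α) (T : List α)
    (h : t ∉ T) :
    ks.countP (fun a => (t :: T).contains a)
      = ks.count t + ks.countP (fun a => T.contains a) := by
  induction ks with
  | nil => simp
  | cons x ks ih =>
    by_cases hx : x = t
    · subst hx
      simp only [List.countP_cons, List.count_cons, ih]
      simp [h]
      try omega
    · by_cases hm : x ∈ T <;>
        · simp only [List.countP_cons, List.count_cons, ih]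
          simp [hx, hm]
          try omega

-- sum of per-target counts over Nodup targets = count of elements hitting any target
theorem sum_count_eq_countP {α : Type} [BEq α] [LawfulBEq α] (T : List α) (ks : List α)
    (h : T.Nodup) :
    (T.map (fun t => (ks.count t : Int))).sum
      = (ks.countP (fun a => T.contains a) : Int) := by
  induction T with
  | nil => simp
  | cons t T ih =>
    rcases List.nodup_cons.mp h with ⟨ht, hT⟩
    simp only [List.map_cons, List.sum_cons, ih hT, countP_mem_cons ks t T ht]
    push_cast
    ring

-- the residue of a nonneg index mod 40 further reduced mod a divisor of 40
theorem mod_mod_of_dvd (j : Int) (L : Int) (hL : L ∣ 40) (h40 : (0:Int) < 40) (hLpos : 0 < L) :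
    PySem.Int.mod (PySem.Int.mod j 40) L = PySem.Int.mod j L := by
  rw [PySem.Int.mod_eq_emod_of_pos h40, PySem.Int.mod_eq_emod_of_pos hLpos,
      PySem.Int.mod_eq_emod_of_pos hLpos]
  exact Int.emod_emod_of_dvd j hL

-- B's per-pattern 40-lookup sum equals the match count over positions
theorem score_eq_countP (answers pat : List Int) (hL : ((pat.length : Int)) ∣ 40)
    (hLpos : (0:Int) < (pat.length : Int)) :
    ((PySem.List.pyRange 0 40 1).map
       (fun r =>
         ((PySem.List.enumerate answers 0).foldl
           (fun (h : PySem.Dict (Int × Int) Int) p =>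
             h.insert (PySem.Int.mod p.1 40, p.2)
               (h.getD (PySem.Int.mod p.1 40, p.2) 0 + 1))
           PySem.Dict.empty).getD
           (r, PySem.List.pyGetD pat (PySem.Int.mod r (pat.length : Int)) 0) 0)).sum
      = ((PySem.List.pyRange 0 answers.length 1).countP
          (fun j => decide (PySem.List.pyGetD answers j 0
            = PySem.List.pyGetD pat (PySem.Int.mod j (pat.length : Int)) 0)) : Int) := by
  -- rewrite histogram lookups as counts in the key list
  have hfold := foldl_insert_key (PySem.List.enumerate answers 0)
      (fun p => (PySem.Int.mod p.1 40, p.2)) PySem.Dict.empty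
  rw [hfold]
  set ks := (PySem.List.enumerate answers 0).map (fun p => (PySem.Int.mod p.1 40, p.2)) with hks
  have hget : ∀ t : Int × Int,
      (ks.foldl (fun (h : PySem.Dict (Int × Int) Int) x => h.insert x (h.getD x 0 + 1))
        PySem.Dict.empty).getD t 0 = (ks.count t : Int) := by
    intro t
    rw [PySem.Dict.getD_foldl_insert_add_one]
    simp
  simp only [hget]
  -- the 40 target keys, one per residue
  set e : Int → Int := fun r => PySem.List.pyGetD pat (PySem.Int.mod r (pat.length : Int)) 0 with he
  have hmapT : ((PySem.List.pyRange 0 40 1).map (fun r => (ks.count (r, e r) : Int))).sum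
      = ((((PySem.List.pyRange 0 40 1).map (fun r => (r, e r))).map
          (fun t => (ks.count t : Int))).sum) := by
    rw [List.map_map]
    rfl
  rw [hmapT, sum_count_eq_countP]
  · -- countP over ks via membership ↔ the match condition
    have hksr : ks = (PySem.List.pyRange 0 answers.length 1).map
        (fun j => (PySem.Int.mod j 40, PySem.List.pyGetD answers j 0)) := by
      rw [hks, PySem.List.enumerate_eq_map_pyRange (d := 0), List.map_map]
      rfl
    rw [hksr, List.countP_map]
    have hpt : ∀ j ∈ PySem.List.pyRange 0 answers.length 1,
        (((PySem.List.pyRange 0 40 1).map (fun r => (r, e r))).contains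
            (PySem.Int.mod j 40, PySem.List.pyGetD answers j 0)
          = decide (PySem.List.pyGetD answers j 0
            = PySem.List.pyGetD pat (PySem.Int.mod j (pat.length : Int)) 0)) := by
      intro j hj
      have hc : (((PySem.List.pyRange 0 40 1).map (fun r => (r, e r))).contains
          (PySem.Int.mod j 40, PySem.List.pyGetD answers j 0))
          = decide ((PySem.Int.mod j 40, PySem.List.pyGetD answers j 0)
            ∈ (PySem.List.pyRange 0 40 1).map (fun r => (r, e r))) := by simp
      rw [hc]
      have hj0 : 0 ≤ j := (PySem.List.mem_pyRange_one.mp hj).1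
      have hm0 : 0 ≤ PySem.Int.mod j 40 := PySem.Int.mod_nonneg j (by norm_num)
      have hm40 : PySem.Int.mod j 40 < 40 := PySem.Int.mod_lt j (by norm_num)
      have hmem : PySem.Int.mod j 40 ∈ PySem.List.pyRange 0 40 1 :=
        PySem.List.mem_pyRange_one.mpr ⟨hm0, hm40⟩
      have hee : e (PySem.Int.mod j 40)
          = PySem.List.pyGetD pat (PySem.Int.mod j (pat.length : Int)) 0 := by
        rw [he]
        simp only
        rw [mod_mod_of_dvd j _ hL (by norm_num) hLpos]
      simp only [List.mem_map, decide_eq_decide]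
      constructor
      · rintro ⟨r, _, hr⟩
        have h1 : r = PySem.Int.mod j 40 := congrArg Prod.fst hr
        have h2 : e r = PySem.List.pyGetD answers j 0 := congrArg Prod.snd hr
        rw [h1, hee] at h2
        exact h2.symm
      · intro hv
        exact ⟨PySem.Int.mod j 40, hmem, by rw [hee, ← hv]⟩
    have hcong : List.countP
        ((fun a => ((PySem.List.pyRange 0 40 1).map (fun r => (r, e r))).contains a)
          ∘ (fun j => (PySem.Int.mod j 40, PySem.List.pyGetD answers j 0)))
        (PySem.List.pyRange 0 answers.length 1)
        = List.countP (fun j => decide (PySem.List.pyGetD answers j 0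
            = PySem.List.pyGetD pat (PySem.Int.mod j (pat.length : Int)) 0))
          (PySem.List.pyRange 0 answers.length 1) := by
      refine List.countP_congr ?_
      intro j hj
      simp only [Function.comp_apply]
      rw [hpt j hj]
    rw [hcong]
  · -- the 40 targets are Nodup (distinct first components)
    exact List.Nodup.map (fun a b hab => congrArg Prod.fst hab)
      (by decide : (PySem.List.pyRange 0 40 1).Nodup)

-- case split on the three score-equals-max tests, both shapes at once
theorem chain3 (s1 s2 s3 m : Int) (b1 b2 b3 : Bool)
    (d1 : decide (s1 = m) = b1) (d2 : decide (s2 = m) = b2) (d3 : decide (s3 = m) = b3) :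
    (let answer : List Int := []
     let answer := if m = s1 then answer ++ [1] else answer
     let answer := if m = s2 then answer ++ [2] else answer
     if m = s3 then answer ++ [3] else answer)
      = (List.filter (fun k => decide (PySem.List.pyGetD [s1, s2, s3] k 0 = m)) [0, 1, 2]).map
          (fun k => k + 1) := by
  have g0 : PySem.List.pyGetD [s1, s2, s3] 0 0 = s1 := rfl
  have g1 : PySem.List.pyGetD [s1, s2, s3] 1 0 = s2 := rfl
  have g2 : PySem.List.pyGetD [s1, s2, s3] 2 0 = s3 := rfl
  have e1 : (m = s1) ↔ (b1 = true) := by rw [← d1]; simp [eq_comm]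
  have e2 : (m = s2) ↔ (b2 = true) := by rw [← d2]; simp [eq_comm]
  have e3 : (m = s3) ↔ (b3 = true) := by rw [← d3]; simp [eq_comm]
  simp only [e1, e2, e3, List.filter_cons, List.filter_nil, g0, g1, g2, d1, d2, d3]
  cases b1 <;> cases b2 <;> cases b3 <;> simp

-- final selection: A's max/append ladder = B's filter over [0,1,2]
theorem select_eq (s1 s2 s3 : Int) :
    (let max_num := max s1 (max s2 s3)
     let answer : List Int := []
     let answer := if max_num = s1 then answer ++ [1] else answer
     let answer := if max_num = s2 then answer ++ [2] else answer
     if max_num = s3 then answer ++ [3] else answer)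
      = (let best := (PySem.List.max? [s1, s2, s3] (fun s => s)).getD 0
         ((PySem.List.pyRange 0 3 1).filter
           (fun k => PySem.List.pyGetD [s1, s2, s3] k 0 = best)).map (fun k => k + 1)) := by
  have hb : (PySem.List.max? [s1, s2, s3] (fun s => s)).getD 0 = max (max s1 s2) s3 := by
    rw [PySem.List.max?_id_cons]; simp [List.foldl]
  have hr : PySem.List.pyRange 0 3 1 = [0, 1, 2] := by decide
  have hmax : max s1 (max s2 s3) = max (max s1 s2) s3 := (max_assoc s1 s2 s3).symm
  simp only [hb, hr, hmax]
  exact chain3 s1 s2 s3 (max (max s1 s2) s3) _ _ _ rfl rfl rfl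

set_option maxHeartbeats 1000000 in
theorem solution_spec_aux (answers : List Int) : solution answers = solution_alt answers := by
  simp only [solution, solution_alt, List.map_cons, List.map_nil]
  rw [foldl_triple]
  rw [PySem.List.foldl_ite_add_one, PySem.List.foldl_ite_add_one, PySem.List.foldl_ite_add_one]
  rw [← score_eq_countP answers [1,2,3,4,5] (by norm_num) (by norm_num),
      ← score_eq_countP answers [2,1,2,3,2,4,2,5] (by norm_num) (by norm_num),
      ← score_eq_countP answers [3,3,1,1,2,2,4,4,5,5] (by norm_num) (by norm_num)]
  simp only [zero_add]
  exact select_eq _ _ _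

-- ===== VERDICT (by name: the statement is the Claim_ definition above) =====
theorem solution_spec : Claim_equal_solution := by
  intro answers _
  exact solution_spec_aux answers
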